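-- pv_equiv track=rewrite | github.com/ygormutti/d10r | utils.py | combinar2
-- ===== SOURCE A (Python) =====
-- def combinar2(itens):
--     '''combinar2(itens) -> lista de tuplas
--
--     Gera combinações simples dos itens tomados 2 a 2, sem repetições ou
--     combinações com a ordem trocada.'''
--     combinacoes = []
--     for a in itens:
--         for b in itens:
--             if a != b:
--                 par = set()
--                 par.add(a); par.add(b)
--                 for p in combinacoes:
--                     if not p.difference(par): # se p for igual a par
--                         break
--                 else:
--                     combinacoes.append(par)
--
--     for i, p in enumerate(combinacoes):
--         combinacoes[i] = tuple(p)
--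
--     combinacoes.sort(key=lambda x: x[0] + x[1])
--     return combinacoes
-- ===== SOURCE B (Python) =====
-- def combinar2(itens):
--     '''combinar2(itens) -> lista de tuplas
--
--     Gera combinacoes simples dos itens tomados 2 a 2, sem repeticoes ou
--     combinacoes com a ordem trocada.'''
--     vistos = set()
--     pares = []
--     for i, a in enumerate(itens):
--         for b in itens[i + 1:]:
--             if a != b:
--                 par = frozenset((a, b))
--                 if par not in vistos:
--                     vistos.add(par)
--                     pares.append(tuple(par))
--     pares.sort(key=lambda x: x[0] + x[1])
--     return pares
-- ===== Notes on version B (the rewrite author's own statement) =====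
-- stated objective: faster
-- what changed: A dedups each candidate pair by rescanning the whole accumulated pair list inside a full n-by-n double loop; B enumerates each index pair i<j once and dedups with a hash set of frozensets, so the inner rescan of the accumulated pairs disappears.
import Mathlib
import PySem

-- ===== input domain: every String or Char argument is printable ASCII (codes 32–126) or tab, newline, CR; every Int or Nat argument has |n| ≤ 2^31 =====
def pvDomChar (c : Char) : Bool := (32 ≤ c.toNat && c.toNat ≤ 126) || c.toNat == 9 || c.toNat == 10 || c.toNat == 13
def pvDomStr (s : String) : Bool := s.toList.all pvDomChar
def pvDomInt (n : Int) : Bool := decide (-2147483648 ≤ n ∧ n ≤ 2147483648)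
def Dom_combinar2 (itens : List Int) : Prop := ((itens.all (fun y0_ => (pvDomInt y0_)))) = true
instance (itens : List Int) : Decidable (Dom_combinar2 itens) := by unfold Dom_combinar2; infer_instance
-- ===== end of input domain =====

-- B replaces A's pair-level rescan dedup (inner loop over the accumulated pair list inside a full
-- n×n double loop) by a single i<j enumeration with a hash-set (frozenset) dedup; return values
-- agree exactly (return-value equivalence; A sorts only its local list, no caller-visible mutation).

-- ===== shared Python-builtin model =====
-- Model of CPython's iteration order of the two-element (frozen)set {a, b} built by inserting a
-- then b (exact on Dom: |n| ≤ 2^31 so hash(n) = n except hash(-1) = -2; 8-slot table,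
-- slot = hash & 7, probe: perturb >>= 5; i = (i*5 + perturb + 1) & 7). Both Pythons build such a
-- set and tuple it, so both ports use it.
def pvUHash (n : Int) : Nat := ((if n = -1 then -2 else n).emod (2 ^ 64)).toNat

def pvProbe (sa : Nat) : Nat → Nat → Nat → Nat
  | 0, i, _ => i
  | fuel + 1, i, perturb =>
      if i = sa then pvProbe sa fuel ((i * 5 + (perturb >>> 5) + 1) % 8) (perturb >>> 5) else i

def pairSet (a b : Int) : List Int :=
  let sa := pvUHash a % 8
  let sb := pvProbe sa 100 (pvUHash b % 8) (pvUHash b)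
  if sb < sa then [b, a] else [a, b]

-- key=lambda x: x[0] + x[1] (both Pythons sort with the same lambda; every stored pair has two elements)
def pvKey (p : List Int) : Int :=
  match p with
  | x :: y :: _ => x + y
  | _ => 0

-- ===== PORT A =====
-- 'for p in combinacoes: if not p.difference(par): break / else: combinacoes.append(par)':
-- p.difference(par) is empty iff every element of p lies in par.
def pvTest (acc : List (List Int)) (par : List Int) : Bool :=
  acc.any (fun p => p.all (fun x => decide (x ∈ par)))

def pvStep (acc : List (List Int)) (par : List Int) : List (List Int) :=
  if pvTest acc par then acc else acc ++ [par]

-- inner 'for b in itens' loop of A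
def pvInner (itens : List Int) (a : Int) (acc : List (List Int)) : List (List Int) :=
  itens.foldl (fun acc b => if a ≠ b then pvStep acc (pairSet a b) else acc) acc

def combinar2 (itens : List Int) : List (List Int) :=
  -- each set in combinacoes is represented by its table-order element list, so the final
  -- 'combinacoes[i] = tuple(p)' rewrite loop is the identity here
  let combinacoes := itens.foldl (fun acc a => pvInner itens a acc) []
  PySem.List.sorted combinacoes pvKey

-- ===== PORT B =====
-- frozenset equality ('par not in vistos' compares frozensets extensionally)
def pvEq2 (p q : List Int) : Bool :=
  p.all (fun x => decide (x ∈ q)) && q.all (fun x => decide (x ∈ p))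

-- inner 'for b in itens[i+1:]' body of B; state = (vistos, pares)
def pvStepB (a : Int) (s : List (List Int) × List (List Int)) (b : Int) :
    List (List Int) × List (List Int) :=
  if a ≠ b then
    if s.1.any (fun q => pvEq2 q (pairSet a b)) then s
    else (s.1 ++ [pairSet a b], s.2 ++ [pairSet a b])
  else s

-- 'for i, a in enumerate(itens): for b in itens[i+1:]' as recursion on the suffix
def pvCollect : List Int → List (List Int) × List (List Int) → List (List Int)
  | [], s => s.2
  | a :: rest, s => pvCollect rest (rest.foldl (pvStepB a) s)

def combinar2_alt (itens : List Int) : List (List Int) :=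
  PySem.List.sorted (pvCollect itens ([], [])) pvKey

-- ===== PRECONDITION & SPEC =====
def Spec_combinar2 (itens : List Int) (out : List (List Int)) : Prop := out = combinar2_alt itens
instance (itens : List Int) (out : List (List Int)) : Decidable (Spec_combinar2 itens out) := by unfold Spec_combinar2; infer_instance

-- ===== CLAIM (what is proved, stated in full; the proofs are below) =====
def Claim_equal_combinar2 : Prop := ∀ (itens : List Int), Dom_combinar2 itens → Spec_combinar2 itens (combinar2 itens)

-- ===== LEMMAS AND PROOFS =====

-- pairSet always lists exactly the two inserted elements
theorem pairSet_cases (a b : Int) : pairSet a b = [a, b] ∨ pairSet a b = [b, a] := by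
  by_cases h : pvProbe (pvUHash a % 8) 100 (pvUHash b % 8) (pvUHash b) < pvUHash a % 8 <;>
    simp [pairSet, h]

theorem mem_pairSet {x a b : Int} : x ∈ pairSet a b ↔ x = a ∨ x = b := by
  rcases pairSet_cases a b with h | h <;> simp [h, or_comm]

-- the 'p.difference(par) empty' test on two two-element sets is set equality
theorem all_mem_pairSet {a b x y : Int} (hxy : x ≠ y) :
    ((pairSet x y).all (fun t => decide (t ∈ pairSet a b)) = true) ↔
      ((x = a ∧ y = b) ∨ (x = b ∧ y = a)) := by
  rcases pairSet_cases x y with h | h <;>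
    simp [h, mem_pairSet] <;> omega

-- frozenset equality on two two-element sets is the same set equality
theorem pvEq2_pairSet {a b x y : Int} (hxy : x ≠ y) :
    (pvEq2 (pairSet x y) (pairSet a b) = true) ↔
      ((x = a ∧ y = b) ∨ (x = b ∧ y = a)) := by
  unfold pvEq2
  rw [Bool.and_eq_true]
  constructor
  · rintro ⟨h1, _⟩
    exact (all_mem_pairSet hxy).mp h1
  · rintro (⟨rfl, rfl⟩ | ⟨rfl, rfl⟩) <;>
      constructor <;>
        simp only [List.all_eq_true, mem_pairSet, decide_eq_true_eq] <;> tauto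

-- pairs already found when the unique values V are fully processed and W still follows
def pvPb : List Int → List Int → List (List Int)
  | [], _ => []
  | v :: V, W => (V ++ W).map (pairSet v) ++ pvPb V W

-- fresh values of a list relative to already-seen values V, in first-occurrence order
def pvNf (V : List Int) : List Int → List Int
  | [] => []
  | a :: L => if a ∈ V then pvNf V L else a :: pvNf (V ++ [a]) L

set_option maxHeartbeats 1000000 in
theorem pvTest_pb {V W : List Int} {x y : Int} (h : (V ++ W).Nodup) (hxy : x ≠ y) :
    pvTest (pvPb V W) (pairSet x y) = true ↔
      (x ∈ V ++ W ∧ y ∈ V ++ W ∧ (x ∈ V ∨ y ∈ V)) := by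
  induction V with
  | nil => simp [pvPb, pvTest]
  | cons v V ih =>
    rw [List.cons_append, List.nodup_cons] at h
    obtain ⟨hv, hnd⟩ := h
    have ih' := ih hnd
    show pvTest ((V ++ W).map (pairSet v) ++ pvPb V W) (pairSet x y) = true ↔ _
    simp only [pvTest, List.any_append, Bool.or_eq_true, List.any_map, Function.comp,
      List.any_eq_true] at ih' ⊢
    have hmap : ∀ w, w ∈ V ++ W →
        ((((pairSet v w).all (fun t => decide (t ∈ pairSet x y))) = true) ↔
          ((v = x ∧ w = y) ∨ (v = y ∧ w = x))) := by
      intro w hw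
      exact all_mem_pairSet (x := v) (y := w) (a := x) (b := y)
        (fun (e : v = w) => hv (by rw [e]; exact hw))
    constructor
    · rintro ((⟨w, hw, hall⟩ | ⟨w, hw, hall⟩) | hrest)
      · rcases (hmap w (List.mem_append_left W hw)).mp hall with ⟨rfl, rfl⟩ | ⟨rfl, rfl⟩ <;>
          simp only [List.mem_cons, List.mem_append] <;> tauto
      · rcases (hmap w (List.mem_append_right V hw)).mp hall with ⟨rfl, rfl⟩ | ⟨rfl, rfl⟩ <;>
          simp only [List.mem_cons, List.mem_append] <;> tauto
      · have := ih'.mp hrest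
        simp only [List.mem_cons, List.mem_append] at this ⊢
        tauto
    · rintro ⟨hx, hy, hvy⟩
      simp only [List.mem_cons, List.mem_append] at hx hy hvy
      rcases hx with (rfl | hx) | hx
      · rcases hy with (rfl | hy) | hy
        · exact absurd rfl hxy
        · exact Or.inl (Or.inl ⟨y, hy, (hmap y (List.mem_append_left W hy)).mpr (Or.inl ⟨rfl, rfl⟩)⟩)
        · exact Or.inl (Or.inr ⟨y, hy, (hmap y (List.mem_append_right V hy)).mpr (Or.inl ⟨rfl, rfl⟩)⟩)
      · rcases hy with (rfl | hy) | hy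
        · exact Or.inl (Or.inl ⟨x, hx, (hmap x (List.mem_append_left W hx)).mpr (Or.inr ⟨rfl, rfl⟩)⟩)
        · refine Or.inr (ih'.mpr ?_)
          simp only [List.mem_append]
          refine ⟨Or.inl hx, Or.inl hy, ?_⟩
          rcases hvy with (rfl | _) | (rfl | _)
          · exact absurd (List.mem_append_left W hx) hv
          · exact Or.inl hx
          · exact absurd (List.mem_append_left W hy) hv
          · exact Or.inr hy
        · refine Or.inr (ih'.mpr ?_)
          simp only [List.mem_append]
          refine ⟨Or.inl hx, Or.inr hy, ?_⟩
          rcases hvy with (rfl | _) | (rfl | hy')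
          · exact absurd (List.mem_append_left W hx) hv
          · exact Or.inl hx
          · exact absurd (List.mem_append_right V hy) hv
          · exact Or.inr hy'
      · rcases hy with (rfl | hy) | hy
        · exact Or.inl (Or.inr ⟨x, hx, (hmap x (List.mem_append_right V hx)).mpr (Or.inr ⟨rfl, rfl⟩)⟩)
        · refine Or.inr (ih'.mpr ?_)
          simp only [List.mem_append]
          refine ⟨Or.inr hx, Or.inl hy, ?_⟩
          rcases hvy with (rfl | hx') | (rfl | _)
          · exact absurd (List.mem_append_right V hx) hv
          · exact Or.inl hx'
          · exact absurd (List.mem_append_left W hy) hv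
          · exact Or.inr hy
        · refine Or.inr (ih'.mpr ?_)
          simp only [List.mem_append]
          refine ⟨Or.inr hx, Or.inr hy, ?_⟩
          rcases hvy with (rfl | hx') | (rfl | hy')
          · exact absurd (List.mem_append_right V hx) hv
          · exact Or.inl hx'
          · exact absurd (List.mem_append_right V hy) hv
          · exact Or.inr hy'

-- the frozenset-membership test of B has the same characterisation on pvPb states
def pvTestB (acc : List (List Int)) (par : List Int) : Bool :=
  acc.any (fun q => pvEq2 q par)

set_option maxHeartbeats 1000000 in
theorem pvTestB_pb {V W : List Int} {x y : Int} (h : (V ++ W).Nodup) (hxy : x ≠ y) :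
    pvTestB (pvPb V W) (pairSet x y) = true ↔
      (x ∈ V ++ W ∧ y ∈ V ++ W ∧ (x ∈ V ∨ y ∈ V)) := by
  induction V with
  | nil => simp [pvPb, pvTestB]
  | cons v V ih =>
    rw [List.cons_append, List.nodup_cons] at h
    obtain ⟨hv, hnd⟩ := h
    have ih' := ih hnd
    show pvTestB ((V ++ W).map (pairSet v) ++ pvPb V W) (pairSet x y) = true ↔ _
    simp only [pvTestB, List.any_append, Bool.or_eq_true, List.any_map, Function.comp,
      List.any_eq_true] at ih' ⊢
    have hmap : ∀ w, w ∈ V ++ W →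
        ((pvEq2 (pairSet v w) (pairSet x y) = true) ↔
          ((v = x ∧ w = y) ∨ (v = y ∧ w = x))) := by
      intro w hw
      exact pvEq2_pairSet (x := v) (y := w) (a := x) (b := y)
        (fun (e : v = w) => hv (by rw [e]; exact hw))
    constructor
    · rintro ((⟨w, hw, hall⟩ | ⟨w, hw, hall⟩) | hrest)
      · rcases (hmap w (List.mem_append_left W hw)).mp hall with ⟨rfl, rfl⟩ | ⟨rfl, rfl⟩ <;>
          simp only [List.mem_cons, List.mem_append] <;> tauto
      · rcases (hmap w (List.mem_append_right V hw)).mp hall with ⟨rfl, rfl⟩ | ⟨rfl, rfl⟩ <;>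
          simp only [List.mem_cons, List.mem_append] <;> tauto
      · have := ih'.mp hrest
        simp only [List.mem_cons, List.mem_append] at this ⊢
        tauto
    · rintro ⟨hx, hy, hvy⟩
      simp only [List.mem_cons, List.mem_append] at hx hy hvy
      rcases hx with (rfl | hx) | hx
      · rcases hy with (rfl | hy) | hy
        · exact absurd rfl hxy
        · exact Or.inl (Or.inl ⟨y, hy, (hmap y (List.mem_append_left W hy)).mpr (Or.inl ⟨rfl, rfl⟩)⟩)
        · exact Or.inl (Or.inr ⟨y, hy, (hmap y (List.mem_append_right V hy)).mpr (Or.inl ⟨rfl, rfl⟩)⟩)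
      · rcases hy with (rfl | hy) | hy
        · exact Or.inl (Or.inl ⟨x, hx, (hmap x (List.mem_append_left W hx)).mpr (Or.inr ⟨rfl, rfl⟩)⟩)
        · refine Or.inr (ih'.mpr ?_)
          simp only [List.mem_append]
          refine ⟨Or.inl hx, Or.inl hy, ?_⟩
          rcases hvy with (rfl | _) | (rfl | _)
          · exact absurd (List.mem_append_left W hx) hv
          · exact Or.inl hx
          · exact absurd (List.mem_append_left W hy) hv
          · exact Or.inr hy
        · refine Or.inr (ih'.mpr ?_)
          simp only [List.mem_append]
          refine ⟨Or.inl hx, Or.inr hy, ?_⟩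
          rcases hvy with (rfl | _) | (rfl | hy')
          · exact absurd (List.mem_append_left W hx) hv
          · exact Or.inl hx
          · exact absurd (List.mem_append_right V hy) hv
          · exact Or.inr hy'
      · rcases hy with (rfl | hy) | hy
        · exact Or.inl (Or.inr ⟨x, hx, (hmap x (List.mem_append_right V hx)).mpr (Or.inr ⟨rfl, rfl⟩)⟩)
        · refine Or.inr (ih'.mpr ?_)
          simp only [List.mem_append]
          refine ⟨Or.inr hx, Or.inl hy, ?_⟩
          rcases hvy with (rfl | hx') | (rfl | _)
          · exact absurd (List.mem_append_right V hx) hv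
          · exact Or.inl hx'
          · exact absurd (List.mem_append_left W hy) hv
          · exact Or.inr hy
        · refine Or.inr (ih'.mpr ?_)
          simp only [List.mem_append]
          refine ⟨Or.inr hx, Or.inr hy, ?_⟩
          rcases hvy with (rfl | hx') | (rfl | hy')
          · exact absurd (List.mem_append_right V hx) hv
          · exact Or.inl hx'
          · exact absurd (List.mem_append_right V hy) hv
          · exact Or.inr hy'

theorem pvNf_tail {V L : List Int} {b : Int} {T : List Int}
    (h : pvNf V L = b :: T) : pvNf (V ++ [b]) L = T := by
  induction L generalizing V with
  | nil => simp [pvNf] at h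
  | cons a L ih =>
    by_cases ha : a ∈ V
    · rw [pvNf, if_pos ha] at h
      rw [pvNf, if_pos (List.mem_append_left [b] ha)]
      exact ih h
    · rw [pvNf, if_neg ha] at h
      injection h with h1 h2
      subst h1
      rw [pvNf, if_pos (by simp : a ∈ V ++ [a])]
      exact h2

theorem mem_pvNf_or {V L : List Int} {b : Int} (h : b ∈ L) : b ∈ V ∨ b ∈ pvNf V L := by
  induction L generalizing V with
  | nil => cases h
  | cons a L ih =>
    rcases List.mem_cons.mp h with rfl | hb
    · by_cases ha : b ∈ V
      · exact Or.inl ha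
      · rw [pvNf, if_neg ha]; exact Or.inr (List.mem_cons_self ..)
    · by_cases ha : a ∈ V
      · rw [pvNf, if_pos ha]; exact ih hb
      · rw [pvNf, if_neg ha]
        rcases ih (V := V ++ [a]) hb with hv | hnf
        · rcases List.mem_append.mp hv with hv | hv
          · exact Or.inl hv
          · simp at hv; subst hv; exact Or.inr (List.mem_cons_self ..)
        · exact Or.inr (List.mem_cons_of_mem _ hnf)

theorem pvNf_nodup {V : List Int} (L : List Int) (h : V.Nodup) : (V ++ pvNf V L).Nodup := by
  induction L generalizing V with
  | nil => simpa [pvNf]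
  | cons a L ih =>
    by_cases ha : a ∈ V
    · rw [pvNf, if_pos ha]; exact ih h
    · rw [pvNf, if_neg ha]
      have := ih (V := V ++ [a]) (by simp only [List.nodup_append]; exact ⟨h, List.nodup_singleton a, by simpa using fun z hz (e : z = a) => ha (e ▸ hz)⟩)
      simpa using this

theorem pvPb_snoc (V W : List Int) (a : Int) :
    pvPb (V ++ [a]) W = pvPb V (a :: W) ++ W.map (pairSet a) := by
  induction V with
  | nil => simp [pvPb]
  | cons v V ih =>
    show pvPb ((v :: (V ++ [a]))) W = _
    rw [pvPb, ih]
    show _ = (V ++ (a :: W)).map (pairSet v) ++ pvPb V (a :: W) ++ W.map (pairSet a)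
    simp

-- ===== A-side loop characterisation =====

theorem pvInner_spec (a : Int) (V W : List Int)
    (hnd : (V ++ a :: W).Nodup) :
    ∀ (ys D W'' : List Int),
      W = D ++ W'' →
      (∀ b ∈ ys, b ∈ V ∨ b = a ∨ b ∈ W) →
      pvNf (V ++ a :: D) ys = W'' →
      ys.foldl (fun acc b => if a ≠ b then pvStep acc (pairSet a b) else acc)
          (pvPb V (a :: W) ++ D.map (pairSet a))
        = pvPb V (a :: W) ++ W.map (pairSet a) := by
  obtain ⟨hV, hcw, hdisj⟩ := List.nodup_append.mp hnd
  obtain ⟨haW, hWnd⟩ := List.nodup_cons.mp hcw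
  have haV : a ∉ V := fun h => hdisj a h a (List.mem_cons_self ..) rfl
  have test_append : ∀ (X Y : List (List Int)) c,
      pvTest (X ++ Y) c = (pvTest X c || pvTest Y c) := by
    intro X Y c; simp [pvTest, List.any_append]
  have tX : ∀ b, a ≠ b → ((pvTest (pvPb V (a :: W)) (pairSet a b) = true) ↔ b ∈ V) := by
    intro b hb
    rw [pvTest_pb hnd hb]
    constructor
    · rintro ⟨_, _, h | h⟩
      exacts [absurd h haV, h]
    · intro h
      exact ⟨List.mem_append_right V (List.mem_cons_self ..), List.mem_append_left _ h, Or.inr h⟩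
  have tY : ∀ (D : List Int), (∀ d ∈ D, d ∈ W) → ∀ b, a ≠ b →
      ((pvTest (D.map (pairSet a)) (pairSet a b) = true) ↔ b ∈ D) := by
    intro D hD b hb
    simp only [pvTest, List.any_map, Function.comp, List.any_eq_true]
    constructor
    · rintro ⟨d, hd, hall⟩
      have had : a ≠ d := fun (e : a = d) => haW (by rw [e]; exact hD d hd)
      rcases (all_mem_pairSet (x := a) (y := d) (a := a) (b := b) had).mp hall with
        ⟨_, rfl⟩ | ⟨e, _⟩
      · exact hd
      · exact absurd e hb
    · intro hbD
      exact ⟨b, hbD,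
        (all_mem_pairSet (fun (e : a = b) => haW (by rw [e]; exact hD b hbD))).mpr (Or.inl ⟨rfl, rfl⟩)⟩
  intro ys
  induction ys with
  | nil =>
    intro D W'' hW _ hnf
    rw [pvNf] at hnf
    subst hnf
    simp only [List.append_nil] at hW
    subst hW
    rfl
  | cons b ys ih =>
    intro D W'' hW hcov hnf
    have hD : ∀ d ∈ D, d ∈ W := fun d hd => hW ▸ List.mem_append_left W'' hd
    rw [List.foldl_cons]
    rcases hcov b (List.mem_cons_self ..) with hbV | rfl | hbW
    · -- b already fully processed: pair {a,b} is in pvPb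
      have hab : a ≠ b := fun e => haV (e ▸ hbV)
      rw [if_pos hab, pvStep, if_pos (by
        rw [test_append, Bool.or_eq_true]; exact Or.inl ((tX b hab).mpr hbV))]
      have hnf' : pvNf (V ++ a :: D) ys = W'' := by
        rw [pvNf, if_pos (List.mem_append_left _ hbV)] at hnf
        exact hnf
      exact ih D W'' hW (fun c hc => hcov c (List.mem_cons_of_mem _ hc)) hnf'
    · -- b = a: skipped by the a != b guard
      rw [if_neg (fun h => h rfl)]
      have hnf' : pvNf (V ++ b :: D) ys = W'' := by
        rw [pvNf, if_pos (List.mem_append_right V (List.mem_cons_self ..))] at hnf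
        exact hnf
      exact ih D W'' hW (fun c hc => hcov c (List.mem_cons_of_mem _ hc)) hnf'
    · have hab : a ≠ b := fun e => haW (e ▸ hbW)
      rw [if_pos hab]
      by_cases hbD : b ∈ D
      · -- pair {a,b} already added in this very loop
        rw [pvStep, if_pos (by
          rw [test_append, Bool.or_eq_true]; exact Or.inr ((tY D hD b hab).mpr hbD))]
        have hnf' : pvNf (V ++ a :: D) ys = W'' := by
          rw [pvNf, if_pos (List.mem_append_right V (List.mem_cons_of_mem a hbD))] at hnf
          exact hnf
        exact ih D W'' hW (fun c hc => hcov c (List.mem_cons_of_mem _ hc)) hnf'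
      · -- fresh pair: appended
        have hbV : b ∉ V := fun h => hdisj b h b (List.mem_cons_of_mem a hbW) rfl
        have hmem : b ∉ V ++ a :: D := by
          intro h
          rcases List.mem_append.mp h with h | h
          · exact hbV h
          · rcases List.mem_cons.mp h with e | h
            · exact hab e.symm
            · exact hbD h
        rw [pvNf, if_neg hmem] at hnf
        obtain ⟨W3, rfl⟩ : ∃ W3, W'' = b :: W3 := ⟨_, hnf.symm⟩
        injection hnf with _ hnf3
        rw [pvStep, if_neg (by
          rw [test_append, Bool.or_eq_true]
          rintro (h | h)
          · exact hbV ((tX b hab).mp h)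
          · exact hbD ((tY D hD b hab).mp h))]
        have hacc : (pvPb V (a :: W) ++ D.map (pairSet a)) ++ [pairSet a b]
            = pvPb V (a :: W) ++ (D ++ [b]).map (pairSet a) := by
          simp
        rw [hacc]
        refine ih (D ++ [b]) W3 (by simp [hW]) (fun c hc => hcov c (List.mem_cons_of_mem _ hc)) ?_
        rw [show V ++ a :: (D ++ [b]) = (V ++ a :: D) ++ [b] by simp]
        exact hnf3

theorem pvInner_noop (a : Int) (V W : List Int) (ha : a ∈ V) (hnd : (V ++ W).Nodup) :
    ∀ (ys : List Int), (∀ b ∈ ys, b ∈ V ∨ b ∈ W) →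
      ys.foldl (fun acc b => if a ≠ b then pvStep acc (pairSet a b) else acc) (pvPb V W)
        = pvPb V W := by
  intro ys
  induction ys with
  | nil => intro _; rfl
  | cons b ys ih =>
    intro hcov
    rw [List.foldl_cons]
    by_cases hab : a = b
    · rw [if_neg (fun h => h hab)]
      exact ih (fun c hc => hcov c (List.mem_cons_of_mem _ hc))
    · rw [if_pos hab, pvStep, if_pos (by
        rw [pvTest_pb hnd hab]
        refine ⟨List.mem_append_left _ ha, ?_, Or.inl ha⟩
        rcases hcov b (List.mem_cons_self ..) with h | h
        · exact List.mem_append_left _ h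
        · exact List.mem_append_right _ h)]
      exact ih (fun c hc => hcov c (List.mem_cons_of_mem _ hc))

theorem pvOuter_spec (xs : List Int) :
    ∀ (rest V : List Int), V.Nodup → pvNf V rest = pvNf V xs →
      rest.foldl (fun acc a => pvInner xs a acc) (pvPb V (pvNf V xs))
        = pvPb (V ++ pvNf V xs) [] := by
  intro rest
  induction rest with
  | nil =>
    intro V _ hnf
    rw [pvNf] at hnf
    rw [← hnf, List.foldl_nil, List.append_nil]
  | cons c rest ih =>
    intro V hV hnf
    rw [List.foldl_cons]
    by_cases hc : c ∈ V
    · rw [pvNf, if_pos hc] at hnf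
      have hnd := pvNf_nodup (V := V) xs hV
      have hcov : ∀ b ∈ xs, b ∈ V ∨ b ∈ pvNf V xs := fun b hb => mem_pvNf_or hb
      rw [pvInner, pvInner_noop c V (pvNf V xs) hc hnd xs hcov]
      exact ih V hV hnf
    · rw [pvNf, if_neg hc] at hnf
      have hW' : pvNf (V ++ [c]) xs = pvNf (V ++ [c]) rest := by
        rw [pvNf_tail hnf.symm]
      set W' := pvNf (V ++ [c]) rest with hW'def
      have hx : pvNf V xs = c :: W' := by rw [← hnf]
      have hnd : (V ++ c :: W').Nodup := by
        have := pvNf_nodup (V := V) xs hV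
        rw [hx] at this
        exact this
      have hcov : ∀ b ∈ xs, b ∈ V ∨ b = c ∨ b ∈ W' := by
        intro b hb
        rcases mem_pvNf_or (V := V) hb with h | h
        · exact Or.inl h
        · rw [hx] at h
          rcases List.mem_cons.mp h with e | h
          · exact Or.inr (Or.inl e)
          · exact Or.inr (Or.inr h)
      have hinner : pvInner xs c (pvPb V (pvNf V xs)) = pvPb (V ++ [c]) W' := by
        rw [hx, pvInner]
        have := pvInner_spec c V W' hnd xs [] W' rfl hcov hW'
        simp only [List.map_nil, List.append_nil] at this
        rw [this, pvPb_snoc]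
      rw [hinner]
      have hVc : (V ++ [c]).Nodup := by
        rcases List.nodup_append.mp hnd with ⟨h1, h2, h3⟩
        exact List.nodup_append.mpr ⟨h1, List.nodup_singleton c,
          by simpa using fun z hz (e : z = c) => hc (e ▸ hz)⟩
      have := ih (V ++ [c]) hVc (by rw [← hW'def, hW'])
      rw [hW'] at this
      rw [hx, show V ++ c :: W' = V ++ [c] ++ W' by simp]
      exact this

-- ===== B-side loop characterisation =====

-- the fresh-a inner loop of B, mirrored on a synchronised single-list state
theorem pvInnerB_spec (a : Int) (V W : List Int)
    (hnd : (V ++ a :: W).Nodup) :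
    ∀ (ys D W'' : List Int),
      W = D ++ W'' →
      (∀ b ∈ ys, b ∈ V ∨ b = a ∨ b ∈ W) →
      pvNf (V ++ a :: D) ys = W'' →
      (ys.foldl (pvStepB a)
          (pvPb V (a :: W) ++ D.map (pairSet a), pvPb V (a :: W) ++ D.map (pairSet a)))
        = (pvPb V (a :: W) ++ W.map (pairSet a), pvPb V (a :: W) ++ W.map (pairSet a)) := by
  obtain ⟨hV, hcw, hdisj⟩ := List.nodup_append.mp hnd
  obtain ⟨haW, hWnd⟩ := List.nodup_cons.mp hcw
  have haV : a ∉ V := fun h => hdisj a h a (List.mem_cons_self ..) rfl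
  have test_append : ∀ (X Y : List (List Int)) c,
      pvTestB (X ++ Y) c = (pvTestB X c || pvTestB Y c) := by
    intro X Y c; simp [pvTestB, List.any_append]
  have tX : ∀ b, a ≠ b → ((pvTestB (pvPb V (a :: W)) (pairSet a b) = true) ↔ b ∈ V) := by
    intro b hb
    rw [pvTestB_pb hnd hb]
    constructor
    · rintro ⟨_, _, h | h⟩
      exacts [absurd h haV, h]
    · intro h
      exact ⟨List.mem_append_right V (List.mem_cons_self ..), List.mem_append_left _ h, Or.inr h⟩
  have tY : ∀ (D : List Int), (∀ d ∈ D, d ∈ W) → ∀ b, a ≠ b →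
      ((pvTestB (D.map (pairSet a)) (pairSet a b) = true) ↔ b ∈ D) := by
    intro D hD b hb
    simp only [pvTestB, List.any_map, Function.comp, List.any_eq_true]
    constructor
    · rintro ⟨d, hd, hall⟩
      have had : a ≠ d := fun (e : a = d) => haW (by rw [e]; exact hD d hd)
      rcases (pvEq2_pairSet (x := a) (y := d) (a := a) (b := b) had).mp hall with
        ⟨_, rfl⟩ | ⟨e, _⟩
      · exact hd
      · exact absurd e hb
    · intro hbD
      exact ⟨b, hbD,
        (pvEq2_pairSet (fun (e : a = b) => haW (by rw [e]; exact hD b hbD))).mpr (Or.inl ⟨rfl, rfl⟩)⟩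
  intro ys
  induction ys with
  | nil =>
    intro D W'' hW _ hnf
    rw [pvNf] at hnf
    subst hnf
    simp only [List.append_nil] at hW
    subst hW
    rfl
  | cons b ys ih =>
    intro D W'' hW hcov hnf
    have hD : ∀ d ∈ D, d ∈ W := fun d hd => hW ▸ List.mem_append_left W'' hd
    rw [List.foldl_cons]
    rcases hcov b (List.mem_cons_self ..) with hbV | rfl | hbW
    · -- b already fully processed: pair {a,b} is in vistos
      have hab : a ≠ b := fun e => haV (e ▸ hbV)
      rw [pvStepB, if_pos hab]
      rw [show ((pvPb V (a :: W) ++ D.map (pairSet a), pvPb V (a :: W) ++ D.map (pairSet a)).1.any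
            (fun q => pvEq2 q (pairSet a b))) = true by
        show pvTestB _ _ = true
        rw [test_append, Bool.or_eq_true]; exact Or.inl ((tX b hab).mpr hbV)]
      simp only [if_true]
      have hnf' : pvNf (V ++ a :: D) ys = W'' := by
        rw [pvNf, if_pos (List.mem_append_left _ hbV)] at hnf
        exact hnf
      exact ih D W'' hW (fun c hc => hcov c (List.mem_cons_of_mem _ hc)) hnf'
    · -- b = a: skipped by the a != b guard
      rw [pvStepB, if_neg (fun h => h rfl)]
      have hnf' : pvNf (V ++ b :: D) ys = W'' := by
        rw [pvNf, if_pos (List.mem_append_right V (List.mem_cons_self ..))] at hnf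
        exact hnf
      exact ih D W'' hW (fun c hc => hcov c (List.mem_cons_of_mem _ hc)) hnf'
    · have hab : a ≠ b := fun e => haW (e ▸ hbW)
      rw [pvStepB, if_pos hab]
      by_cases hbD : b ∈ D
      · -- pair {a,b} already added in this very loop
        rw [show ((pvPb V (a :: W) ++ D.map (pairSet a), pvPb V (a :: W) ++ D.map (pairSet a)).1.any
              (fun q => pvEq2 q (pairSet a b))) = true by
          show pvTestB _ _ = true
          rw [test_append, Bool.or_eq_true]; exact Or.inr ((tY D hD b hab).mpr hbD)]
        simp only [if_true]
        have hnf' : pvNf (V ++ a :: D) ys = W'' := by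
          rw [pvNf, if_pos (List.mem_append_right V (List.mem_cons_of_mem a hbD))] at hnf
          exact hnf
        exact ih D W'' hW (fun c hc => hcov c (List.mem_cons_of_mem _ hc)) hnf'
      · -- fresh pair: added to vistos and appended to pares
        have hbV : b ∉ V := fun h => hdisj b h b (List.mem_cons_of_mem a hbW) rfl
        have hmem : b ∉ V ++ a :: D := by
          intro h
          rcases List.mem_append.mp h with h | h
          · exact hbV h
          · rcases List.mem_cons.mp h with e | h
            · exact hab e.symm
            · exact hbD h
        rw [pvNf, if_neg hmem] at hnf
        obtain ⟨W3, rfl⟩ : ∃ W3, W'' = b :: W3 := ⟨_, hnf.symm⟩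
        injection hnf with _ hnf3
        rw [show ((pvPb V (a :: W) ++ D.map (pairSet a), pvPb V (a :: W) ++ D.map (pairSet a)).1.any
              (fun q => pvEq2 q (pairSet a b))) = false by
          show pvTestB _ _ = false
          rw [Bool.eq_false_iff]
          intro h
          rw [test_append, Bool.or_eq_true] at h
          rcases h with h | h
          · exact hbV ((tX b hab).mp h)
          · exact hbD ((tY D hD b hab).mp h)]
        simp only [Bool.false_eq_true, if_false]
        have hacc : (pvPb V (a :: W) ++ D.map (pairSet a)) ++ [pairSet a b]
            = pvPb V (a :: W) ++ (D ++ [b]).map (pairSet a) := by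
          simp
        rw [hacc]
        refine ih (D ++ [b]) W3 (by simp [hW]) (fun c hc => hcov c (List.mem_cons_of_mem _ hc)) ?_
        rw [show V ++ a :: (D ++ [b]) = (V ++ a :: D) ++ [b] by simp]
        exact hnf3

-- the seen-a inner loop of B changes nothing
theorem pvInnerB_noop (a : Int) (V W : List Int) (ha : a ∈ V) (hnd : (V ++ W).Nodup) :
    ∀ (ys : List Int), (∀ b ∈ ys, b ∈ V ∨ b ∈ W) →
      ys.foldl (pvStepB a) (pvPb V W, pvPb V W) = (pvPb V W, pvPb V W) := by
  intro ys
  induction ys with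
  | nil => intro _; rfl
  | cons b ys ih =>
    intro hcov
    rw [List.foldl_cons]
    by_cases hab : a = b
    · rw [pvStepB, if_neg (fun h => h hab)]
      exact ih (fun c hc => hcov c (List.mem_cons_of_mem _ hc))
    · rw [pvStepB, if_pos hab]
      rw [show ((pvPb V W, pvPb V W).1.any (fun q => pvEq2 q (pairSet a b))) = true by
        show pvTestB _ _ = true
        rw [pvTestB_pb hnd hab]
        refine ⟨List.mem_append_left _ ha, ?_, Or.inl ha⟩
        rcases hcov b (List.mem_cons_self ..) with h | h
        · exact List.mem_append_left _ h
        · exact List.mem_append_right _ h]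
      simp only [if_true]
      exact ih (fun c hc => hcov c (List.mem_cons_of_mem _ hc))

theorem pvCollect_spec :
    ∀ (xs V : List Int), V.Nodup → (∀ b ∈ xs, b ∈ V ∨ b ∈ pvNf V xs) →
      pvCollect xs (pvPb V (pvNf V xs), pvPb V (pvNf V xs)) = pvPb (V ++ pvNf V xs) [] := by
  intro xs
  induction xs with
  | nil =>
    intro V _ _
    show pvPb V (pvNf V []) = _
    rw [pvNf, List.append_nil]
  | cons a rest ih =>
    intro V hV hcov
    rw [pvCollect]
    by_cases ha : a ∈ V
    · rw [pvNf, if_pos ha]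
      have hnd : (V ++ pvNf V rest).Nodup := pvNf_nodup rest hV
      have hcov' : ∀ b ∈ rest, b ∈ V ∨ b ∈ pvNf V rest := by
        intro b hb
        have := hcov b (List.mem_cons_of_mem a hb)
        rw [pvNf, if_pos ha] at this
        exact this
      rw [show pvNf V (a :: rest) = pvNf V rest by rw [pvNf, if_pos ha]] at *
      rw [pvInnerB_noop a V (pvNf V rest) ha hnd rest hcov']
      exact ih V hV hcov'
    · have hx : pvNf V (a :: rest) = a :: pvNf (V ++ [a]) rest := by rw [pvNf, if_neg ha]
      set W' := pvNf (V ++ [a]) rest with hW'def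
      have hnd : (V ++ a :: W').Nodup := by
        have := pvNf_nodup (V := V) (a :: rest) hV
        rw [hx] at this
        exact this
      have hcovr : ∀ b ∈ rest, b ∈ V ∨ b = a ∨ b ∈ W' := by
        intro b hb
        rcases mem_pvNf_or (V := V) (List.mem_cons_of_mem a hb) with h | h
        · exact Or.inl h
        · rw [hx] at h
          rcases List.mem_cons.mp h with e | h
          · exact Or.inr (Or.inl e)
          · exact Or.inr (Or.inr h)
      have hfold : rest.foldl (pvStepB a) (pvPb V (a :: W'), pvPb V (a :: W'))
          = (pvPb (V ++ [a]) W', pvPb (V ++ [a]) W') := by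
        have := pvInnerB_spec a V W' hnd rest [] W' rfl hcovr hW'def.symm
        simp only [List.map_nil, List.append_nil] at this
        rw [this, pvPb_snoc]
      rw [hx, hfold]
      have hVc : (V ++ [a]).Nodup := by
        rcases List.nodup_append.mp hnd with ⟨h1, _, _⟩
        exact List.nodup_append.mpr ⟨h1, List.nodup_singleton a,
          by simpa using fun z hz (e : z = a) => ha (e ▸ hz)⟩
      have hcov'' : ∀ b ∈ rest, b ∈ V ++ [a] ∨ b ∈ pvNf (V ++ [a]) rest := by
        intro b hb
        exact mem_pvNf_or hb
      have := ih (V ++ [a]) hVc hcov''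
      rw [← hW'def] at this
      rw [this]
      simp

-- ===== VERDICT (by name: the statement is the Claim_ definition above) =====
theorem combinar2_spec : Claim_equal_combinar2 := by
  intro itens _
  unfold Spec_combinar2 combinar2 combinar2_alt
  have hA := pvOuter_spec itens itens [] List.nodup_nil rfl
  rw [show pvPb [] (pvNf [] itens) = [] from rfl] at hA
  rw [List.nil_append] at hA
  have hB := pvCollect_spec itens [] List.nodup_nil
    (fun b hb => by simpa using mem_pvNf_or (V := []) hb)
  rw [show pvPb [] (pvNf [] itens) = [] from rfl] at hB
  rw [List.nil_append] at hB
  rw [hA, hB]
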